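-- pv_equiv track=rewrite | github.com/kathiir/algorithms-for-strings | 3-kmp/borders.py | bp_to_bpm
-- ===== SOURCE A (Python) =====
-- def bp_to_bpm(bp, n):
--     bpm = [0] * n
--     bpm[n - 1] = bp[n - 1]
--     for i in range(1, n - 1):
--         if bp[i] and bp[i] + 1 == bp[i + 1]:
--             bpm[i] = bpm[bp[i] - 1]
--         else:
--             bpm[i] = bp[i]
--     return bpm
-- ===== SOURCE B (Python) =====
-- def bp_to_bpm(bp, n):
--     def collapse(i):
--         j = i
--         while j != 0 and bp[j] and bp[j] + 1 == bp[j + 1]: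
--             j = bp[j] - 1
--         return 0 if j == 0 else bp[j]
--     out = [collapse(i) for i in range(n - 1)]
--     out.append(bp[n - 1])
--     return out
-- ===== Notes on version B (the rewrite author's own statement) =====
-- stated objective: alternative
-- what changed: B drops A's dynamic-programming table fill (bpm[i] = bpm[bp[i]-1] reads memoized entries) and instead computes each entry on demand by walking the border chain j -> bp[j]-1 until it stops, so no intermediate table is ever read.
-- outside the precondition, e.g. on bp_to_bpm([0, 3, 4, 0], 4): A returns [0, 0, 4, 0], B returns [0, 4, 4, 0]
import Mathlib
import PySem

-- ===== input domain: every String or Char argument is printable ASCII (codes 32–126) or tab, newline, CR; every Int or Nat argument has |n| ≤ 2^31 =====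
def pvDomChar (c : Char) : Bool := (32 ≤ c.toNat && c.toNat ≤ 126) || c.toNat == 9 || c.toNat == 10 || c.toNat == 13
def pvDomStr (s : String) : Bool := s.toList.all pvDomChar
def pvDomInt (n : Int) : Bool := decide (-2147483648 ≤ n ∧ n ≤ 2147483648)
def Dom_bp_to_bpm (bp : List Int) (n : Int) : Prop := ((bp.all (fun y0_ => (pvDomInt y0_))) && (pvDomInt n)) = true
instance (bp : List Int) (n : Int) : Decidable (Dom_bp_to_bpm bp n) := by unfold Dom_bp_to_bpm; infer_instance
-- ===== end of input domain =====

-- B replaces A's dynamic-programming fill of bpm with an on-demand walk of the border chain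
-- (no memo table is read); alternative decomposition, not faster (O(n^2) vs A's O(n)).

-- ===== PORT A =====
-- Literal transliteration of A. List reads/writes use pyGetD/`set` with the indices A uses;
-- exact on Pre_ (where every index A evaluates is in range, and nonnegative).
def bp_to_bpm (bp : List Int) (n : Int) : List Int :=
  let bpm : List Int := List.replicate n.toNat 0
  let bpm := bpm.set (n - 1).toNat (PySem.List.pyGetD bp (n - 1) 0)   -- bpm[n-1] = bp[n-1]
  (PySem.List.pyRange 1 (n - 1) 1).foldl (fun bpm i =>
    if PySem.List.pyGetD bp i 0 ≠ 0 ∧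
       PySem.List.pyGetD bp i 0 + 1 = PySem.List.pyGetD bp (i + 1) 0 then
      bpm.set i.toNat (PySem.List.pyGetD bpm (PySem.List.pyGetD bp i 0 - 1) 0)
    else
      bpm.set i.toNat (PySem.List.pyGetD bp i 0)) bpm

-- ===== PORT B =====
-- The while loop of Source B's `collapse`, with fuel making it total; on Pre_ inputs j strictly
-- decreases, so fuel n never runs out and this computes exactly the Python while loop.
def pvChain (bp : List Int) : Nat → Int → Int
  | 0, j => j
  | fuel + 1, j =>
    if j ≠ 0 ∧ PySem.List.pyGetD bp j 0 ≠ 0 ∧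
       PySem.List.pyGetD bp j 0 + 1 = PySem.List.pyGetD bp (j + 1) 0 then
      pvChain bp fuel (PySem.List.pyGetD bp j 0 - 1)
    else j

def pvCollapse (bp : List Int) (n : Int) (i : Int) : Int :=
  let j := pvChain bp n.toNat i
  if j = 0 then 0 else PySem.List.pyGetD bp j 0

def bp_to_bpm_alt (bp : List Int) (n : Int) : List Int :=
  ((PySem.List.pyRange 0 (n - 1) 1).map (pvCollapse bp n)) ++ [PySem.List.pyGetD bp (n - 1) 0]

-- ===== PRECONDITION & SPEC =====
-- Pre_ is A's return domain (1 ≤ n ≤ len(bp); wherever the collapse branch fires the border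
-- value is in border-array range 1 ≤ bp[i] ≤ i — otherwise A raises on bpm[bp[i]-1] or, if the
-- negative index wraps, reads a table slot that is an accident of its fill order, and B's chain
-- walk need not terminate).
def Pre_bp_to_bpm (bp : List Int) (n : Int) : Prop :=
  1 ≤ n ∧ n ≤ (bp.length : Int) ∧
  ∀ i : Nat, i < n.toNat →
    (1 ≤ i ∧ i + 1 < n.toNat ∧ bp.getD i 0 ≠ 0 ∧ bp.getD i 0 + 1 = bp.getD (i + 1) 0) →
    1 ≤ bp.getD i 0 ∧ bp.getD i 0 ≤ (i : Int)
instance (bp : List Int) (n : Int) : Decidable (Pre_bp_to_bpm bp n) := by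
  unfold Pre_bp_to_bpm; infer_instance

def pvWitness_bp_to_bpm : List Int × Int := ([0, 0, 1, 2, 0, 1], 6)

def Spec_bp_to_bpm (bp : List Int) (n : Int) (out : List Int) : Prop := out = bp_to_bpm_alt bp n
instance (bp : List Int) (n : Int) (out : List Int) : Decidable (Spec_bp_to_bpm bp n out) := by
  unfold Spec_bp_to_bpm; infer_instance

-- ===== CLAIM (what is proved, stated in full; the proofs are below) =====
def Claim_equal_bp_to_bpm : Prop := ∀ (bp : List Int) (n : Int), Dom_bp_to_bpm bp n → Pre_bp_to_bpm bp n → Spec_bp_to_bpm bp n (bp_to_bpm bp n)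

-- ===== LEMMAS AND PROOFS =====

-- canonical chain value reached from j (fuel j suffices on Pre_ inputs)
def pvCval (bp : List Int) (j : Nat) : Int := pvChain bp j (j : Int)

-- the value Source B's collapse returns for index j
def pvF (bp : List Int) (j : Nat) : Int :=
  if pvCval bp j = 0 then 0 else PySem.List.pyGetD bp (pvCval bp j) 0

theorem pvChain_succ (bp : List Int) (f : Nat) (j : Int) :
    pvChain bp (f + 1) j =
      if j ≠ 0 ∧ PySem.List.pyGetD bp j 0 ≠ 0 ∧
         PySem.List.pyGetD bp j 0 + 1 = PySem.List.pyGetD bp (j + 1) 0 then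
        pvChain bp f (PySem.List.pyGetD bp j 0 - 1)
      else j := rfl

theorem pvChain_zero (bp : List Int) (fuel : Nat) : pvChain bp fuel 0 = 0 := by
  cases fuel <;> simp [pvChain]

-- with enough fuel the chain value is the canonical one
theorem pvChain_adequate (bp : List Int) (N : Nat)
    (hbp : ∀ i : Nat, i < N →
      (1 ≤ i ∧ i + 1 < N ∧ bp.getD i 0 ≠ 0 ∧ bp.getD i 0 + 1 = bp.getD (i + 1) 0) →
      1 ≤ bp.getD i 0 ∧ bp.getD i 0 ≤ (i : Int)) :
    ∀ (j : Nat), j + 1 < N → ∀ fuel, j ≤ fuel →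
      pvChain bp fuel (j : Int) = pvCval bp j := by
  intro j
  induction j using Nat.strong_induction_on with
  | _ j ih =>
    intro hj fuel hf
    match j, fuel with
    | 0, fuel => simp [pvCval, pvChain_zero]
    | k + 1, f + 1 =>
      by_cases hC : PySem.List.pyGetD bp ((k + 1 : Nat) : Int) 0 ≠ 0 ∧
          PySem.List.pyGetD bp ((k + 1 : Nat) : Int) 0 + 1
            = PySem.List.pyGetD bp (((k + 1 : Nat) : Int) + 1) 0
      · have hgd : PySem.List.pyGetD bp ((k + 1 : Nat) : Int) 0 = bp.getD (k + 1) 0 :=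
          PySem.List.pyGetD_natCast ..
        have hgd2 : PySem.List.pyGetD bp (((k + 1 : Nat) : Int) + 1) 0 = bp.getD (k + 2) 0 := by
          rw [show (((k + 1 : Nat) : Int) + 1) = ((k + 2 : Nat) : Int) by push_cast; ring]
          exact PySem.List.pyGetD_natCast ..
        have hb : 1 ≤ bp.getD (k + 1) 0 ∧ bp.getD (k + 1) 0 ≤ ((k + 1 : Nat) : Int) := by
          refine hbp (k + 1) (by omega) ⟨by omega, by omega, ?_, ?_⟩
          · rw [← hgd]; exact hC.1
          · rw [← hgd, ← hgd2]; exact hC.2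
        set b := bp.getD (k + 1) 0 with hbdef
        set t : Nat := (b - 1).toNat with htdef
        have htb : (t : Int) = b - 1 := by omega
        have htk : t ≤ k := by omega
        have hcond : ((k + 1 : Nat) : Int) ≠ 0 ∧ PySem.List.pyGetD bp ((k + 1 : Nat) : Int) 0 ≠ 0 ∧
            PySem.List.pyGetD bp ((k + 1 : Nat) : Int) 0 + 1
              = PySem.List.pyGetD bp (((k + 1 : Nat) : Int) + 1) 0 := ⟨by omega, hC.1, hC.2⟩
        have step : ∀ g : Nat, pvChain bp (g + 1) ((k + 1 : Nat) : Int) = pvChain bp g (t : Int) := by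
          intro g
          rw [pvChain_succ, if_pos hcond, hgd, ← htb]
        have h1 : pvChain bp (f + 1) ((k + 1 : Nat) : Int) = pvChain bp f (t : Int) := step f
        have h2 : pvCval bp (k + 1) = pvChain bp k (t : Int) := step k
        rw [h1, h2, ih t (by omega) (by omega) f (by omega), ih t (by omega) (by omega) k (by omega)]
      · have hne : ¬(((k + 1 : Nat) : Int) ≠ 0 ∧ PySem.List.pyGetD bp ((k + 1 : Nat) : Int) 0 ≠ 0 ∧
            PySem.List.pyGetD bp ((k + 1 : Nat) : Int) 0 + 1
              = PySem.List.pyGetD bp (((k + 1 : Nat) : Int) + 1) 0) := by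
          intro h; exact hC ⟨h.2.1, h.2.2⟩
        simp only [pvCval, pvChain, if_neg hne]

theorem pvF_zero (bp : List Int) : pvF bp 0 = 0 := by
  simp [pvF, pvCval, pvChain]

-- A's loop body and initial table, named for the lemmas below
def pvBody (bp : List Int) (bpm : List Int) (i : Int) : List Int :=
  if PySem.List.pyGetD bp i 0 ≠ 0 ∧
     PySem.List.pyGetD bp i 0 + 1 = PySem.List.pyGetD bp (i + 1) 0 then
    bpm.set i.toNat (PySem.List.pyGetD bpm (PySem.List.pyGetD bp i 0 - 1) 0)
  else
    bpm.set i.toNat (PySem.List.pyGetD bp i 0)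

def pvInit (bp : List Int) (m : Nat) : List Int :=
  (List.replicate m (0 : Int)).set (m - 1) (PySem.List.pyGetD bp ((m : Int) - 1) 0)

theorem bp_to_bpm_eq_foldl (bp : List Int) (n : Int) :
    bp_to_bpm bp n = (PySem.List.pyRange 1 (n - 1) 1).foldl (pvBody bp)
      ((List.replicate n.toNat 0).set (n - 1).toNat (PySem.List.pyGetD bp (n - 1) 0)) := rfl

-- the collapse rule: when A's branch fires at index k+1, the chain value steps to bp[k+1]-1
theorem pvF_pos (bp : List Int) (N : Nat)
    (hbp : ∀ i : Nat, i < N →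
      (1 ≤ i ∧ i + 1 < N ∧ bp.getD i 0 ≠ 0 ∧ bp.getD i 0 + 1 = bp.getD (i + 1) 0) →
      1 ≤ bp.getD i 0 ∧ bp.getD i 0 ≤ (i : Int))
    (k : Nat) (hj : k + 2 < N)
    (hC : PySem.List.pyGetD bp ((k + 1 : Nat) : Int) 0 ≠ 0 ∧
          PySem.List.pyGetD bp ((k + 1 : Nat) : Int) 0 + 1
            = PySem.List.pyGetD bp (((k + 1 : Nat) : Int) + 1) 0) :
    pvF bp (k + 1) = pvF bp (bp.getD (k + 1) 0 - 1).toNat := by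
  have hgd : PySem.List.pyGetD bp ((k + 1 : Nat) : Int) 0 = bp.getD (k + 1) 0 :=
    PySem.List.pyGetD_natCast ..
  have hgd2 : PySem.List.pyGetD bp (((k + 1 : Nat) : Int) + 1) 0 = bp.getD (k + 2) 0 := by
    rw [show (((k + 1 : Nat) : Int) + 1) = ((k + 2 : Nat) : Int) by push_cast; ring]
    exact PySem.List.pyGetD_natCast ..
  have hb : 1 ≤ bp.getD (k + 1) 0 ∧ bp.getD (k + 1) 0 ≤ ((k + 1 : Nat) : Int) := by
    refine hbp (k + 1) (by omega) ⟨by omega, by omega, ?_, ?_⟩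
    · rw [← hgd]; exact hC.1
    · rw [← hgd, ← hgd2]; exact hC.2
  set t : Nat := (bp.getD (k + 1) 0 - 1).toNat with htdef
  have htb : (t : Int) = bp.getD (k + 1) 0 - 1 := by omega
  have hcv : pvCval bp (k + 1) = pvCval bp t := by
    have hcond : ((k + 1 : Nat) : Int) ≠ 0 ∧ PySem.List.pyGetD bp ((k + 1 : Nat) : Int) 0 ≠ 0 ∧
        PySem.List.pyGetD bp ((k + 1 : Nat) : Int) 0 + 1
          = PySem.List.pyGetD bp (((k + 1 : Nat) : Int) + 1) 0 := ⟨by omega, hC.1, hC.2⟩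
    have : pvCval bp (k + 1) = pvChain bp k (t : Int) := by
      rw [pvCval, pvChain_succ, if_pos hcond, hgd, ← htb]
    rw [this, pvChain_adequate bp N hbp t (by omega) k (by omega)]
  simp [pvF, hcv]

-- when A's branch does not fire at index k+1, the collapse value is bp[k+1] itself
theorem pvF_neg (bp : List Int) (k : Nat)
    (hC : ¬(PySem.List.pyGetD bp ((k + 1 : Nat) : Int) 0 ≠ 0 ∧
          PySem.List.pyGetD bp ((k + 1 : Nat) : Int) 0 + 1
            = PySem.List.pyGetD bp (((k + 1 : Nat) : Int) + 1) 0)) :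
    pvF bp (k + 1) = bp.getD (k + 1) 0 := by
  have hgd : PySem.List.pyGetD bp ((k + 1 : Nat) : Int) 0 = bp.getD (k + 1) 0 :=
    PySem.List.pyGetD_natCast ..
  have hcv : pvCval bp (k + 1) = ((k + 1 : Nat) : Int) := by
    rw [pvCval, pvChain_succ, if_neg]
    intro h; exact hC ⟨h.2.1, h.2.2⟩
  have : pvCval bp (k + 1) ≠ 0 := by rw [hcv]; omega
  rw [pvF, if_neg this, hcv, hgd]

-- the value A's table holds at idx after the iterations i = 1 .. k have run
def pvVal (bp : List Int) (m k idx : Nat) : Int :=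
  if idx = m - 1 then PySem.List.pyGetD bp ((m : Int) - 1) 0
  else if idx = 0 then 0
  else if idx ≤ k then pvF bp idx
  else 0

-- loop invariant for A's fill: after iterations 1..k the table holds pvVal bp N k
theorem pv_loop_inv (bp : List Int) (N : Nat)
    (hbp : ∀ i : Nat, i < N →
      (1 ≤ i ∧ i + 1 < N ∧ bp.getD i 0 ≠ 0 ∧ bp.getD i 0 + 1 = bp.getD (i + 1) 0) →
      1 ≤ bp.getD i 0 ∧ bp.getD i 0 ≤ (i : Int))
    (hm : 2 ≤ N) :
    ∀ k : Nat, k ≤ N - 2 →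
      ((PySem.List.pyRange 1 (1 + (k : Int)) 1).foldl (pvBody bp)
          (pvInit bp N)).length = N ∧
      ∀ idx : Nat, idx < N →
        ((PySem.List.pyRange 1 (1 + (k : Int)) 1).foldl (pvBody bp)
            (pvInit bp N)).getD idx 0 = pvVal bp N k idx := by
  intro k
  induction k with
  | zero =>
    intro _
    rw [show ((1 : Int) + (0 : Nat)) = 1 by norm_num, PySem.List.pyRange_one_eq_nil le_rfl]
    constructor
    · simp [pvInit]
    · intro idx hidx
      simp only [List.foldl_nil, pvInit, pvVal]
      by_cases h1 : idx = N - 1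
      · subst h1
        rw [List.getD_eq_getElem _ _ (by simp; omega), List.getElem_set_self (by simp; omega)]
        simp
      · rw [if_neg h1, List.getD_eq_getElem _ _ (by simp; omega),
            List.getElem_set_ne (by omega), List.getElem_replicate]
        split_ifs <;> first | rfl | omega
  | succ k ih =>
    intro hk
    have ihk := ih (by omega)
    have hrange : PySem.List.pyRange 1 (1 + ((k + 1 : Nat) : Int)) 1
        = PySem.List.pyRange 1 (1 + (k : Int)) 1 ++ [1 + (k : Int)] := by
      rw [show (1 + ((k + 1 : Nat) : Int)) = (1 + (k : Int)) + 1 by push_cast; ring]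
      exact PySem.List.pyRange_one_succ_right (by omega)
    set L := (PySem.List.pyRange 1 (1 + (k : Int)) 1).foldl (pvBody bp) (pvInit bp N) with hL
    have hlen : L.length = N := ihk.1
    have hget := ihk.2
    rw [hrange, List.foldl_append]
    simp only [List.foldl_cons, List.foldl_nil, ← hL]
    have hi : (1 + (k : Int)) = ((k + 1 : Nat) : Int) := by push_cast; ring
    have hj : k + 2 < N := by omega
    have hgd : PySem.List.pyGetD bp ((k + 1 : Nat) : Int) 0 = bp.getD (k + 1) 0 :=
      PySem.List.pyGetD_natCast ..
    -- the value written at index k+1 is pvF bp (k+1) in both branches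
    have hwrite : pvBody bp L (1 + (k : Int)) = L.set (k + 1) (pvF bp (k + 1)) := by
      rw [pvBody, hi, show (((k + 1 : Nat) : Int)).toNat = k + 1 by omega]
      by_cases hC : PySem.List.pyGetD bp ((k + 1 : Nat) : Int) 0 ≠ 0 ∧
          PySem.List.pyGetD bp ((k + 1 : Nat) : Int) 0 + 1
            = PySem.List.pyGetD bp (((k + 1 : Nat) : Int) + 1) 0
      · rw [if_pos hC]
        have hgd2 : PySem.List.pyGetD bp (((k + 1 : Nat) : Int) + 1) 0 = bp.getD (k + 2) 0 := by
          rw [show (((k + 1 : Nat) : Int) + 1) = ((k + 2 : Nat) : Int) by push_cast; ring]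
          exact PySem.List.pyGetD_natCast ..
        have hb : 1 ≤ bp.getD (k + 1) 0 ∧ bp.getD (k + 1) 0 ≤ ((k + 1 : Nat) : Int) := by
          refine hbp (k + 1) (by omega) ⟨by omega, by omega, ?_, ?_⟩
          · rw [← hgd]; exact hC.1
          · rw [← hgd, ← hgd2]; exact hC.2
        set t : Nat := (bp.getD (k + 1) 0 - 1).toNat with htdef
        have htb : (t : Int) = bp.getD (k + 1) 0 - 1 := by omega
        have htk : t ≤ k := by omega
        have hLt : PySem.List.pyGetD L (PySem.List.pyGetD bp ((k + 1 : Nat) : Int) 0 - 1) 0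
            = pvF bp t := by
          rw [hgd, ← htb, PySem.List.pyGetD_natCast, hget t (by omega), pvVal,
              if_neg (by omega)]
          by_cases ht0 : t = 0
          · rw [if_pos ht0, ht0, pvF_zero]
          · rw [if_neg ht0, if_pos htk]
        rw [hLt, ← pvF_pos bp N hbp k hj hC]
      · rw [if_neg hC, hgd, ← pvF_neg bp k hC]
    rw [hwrite]
    constructor
    · rw [List.length_set, hlen]
    · intro idx hidx
      have hsl : (L.set (k + 1) (pvF bp (k + 1))).length = N := by
        rw [List.length_set, hlen]
      by_cases he : idx = k + 1
      · subst he
        rw [List.getD_eq_getElem _ _ (by omega), List.getElem_set_self (by omega), pvVal,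
            if_neg (by omega), if_neg (by omega), if_pos le_rfl]
      · rw [List.getD_eq_getElem _ _ (by omega),
            List.getElem_set_ne (by omega), ← List.getD_eq_getElem _ 0 (by omega),
            hget idx hidx, pvVal, pvVal]
        by_cases h1 : idx = N - 1
        · simp [h1]
        · rw [if_neg h1, if_neg h1]
          by_cases h0 : idx = 0
          · simp [h0]
          · rw [if_neg h0, if_neg h0]
            split_ifs <;> first | rfl | omega

-- B's output entry at idx < n-1 is pvF bp idx
theorem pv_alt_entry (bp : List Int) (N : Nat)
    (hbp : ∀ i : Nat, i < N →
      (1 ≤ i ∧ i + 1 < N ∧ bp.getD i 0 ≠ 0 ∧ bp.getD i 0 + 1 = bp.getD (i + 1) 0) →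
      1 ≤ bp.getD i 0 ∧ bp.getD i 0 ≤ (i : Int))
    (idx : Nat) (hidx : idx + 1 < N) :
    pvCollapse bp (N : Int) (idx : Int) = pvF bp idx := by
  rw [pvCollapse]
  have : ((N : Int)).toNat = N := by omega
  rw [this, pvChain_adequate bp N hbp idx hidx N (by omega)]
  rfl

-- ===== VERDICT (by name: the statement is the Claim_ definition above) =====
theorem bp_to_bpm_spec : Claim_equal_bp_to_bpm := by
  intro bp n _ hpre
  obtain ⟨hn1, hnlen, hbp'⟩ := hpre
  unfold Spec_bp_to_bpm
  obtain ⟨N, rfl⟩ : ∃ N : Nat, n = (N : Int) := ⟨n.toNat, by omega⟩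
  rw [show ((N : Int)).toNat = N by omega] at hbp'
  have hbp : ∀ i : Nat, i < N →
      (1 ≤ i ∧ i + 1 < N ∧ bp.getD i 0 ≠ 0 ∧ bp.getD i 0 + 1 = bp.getD (i + 1) 0) →
      1 ≤ bp.getD i 0 ∧ bp.getD i 0 ≤ (i : Int) := by
    intro i hi h
    exact hbp' i (by omega) h
  have hm1 : 1 ≤ N := by omega
  rw [bp_to_bpm_eq_foldl, bp_to_bpm_alt]
  have htoNat : ((N : Int)).toNat = N := by omega
  have h1toNat : ((N : Int) - 1).toNat = N - 1 := by omega
  by_cases hm2 : 2 ≤ N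
  · -- general case
    have hr : ((N : Int) - 1) = 1 + ((N - 2 : Nat) : Int) := by omega
    have hinv := pv_loop_inv bp N hbp hm2 (N - 2) le_rfl
    rw [htoNat, h1toNat, hr]
    have hinit : (List.replicate N (0 : Int)).set (N - 1) (PySem.List.pyGetD bp (1 + ((N - 2 : Nat) : Int)) 0) = pvInit bp N := by
      rw [pvInit, ← hr]
    rw [hinit]
    apply List.ext_getElem
    · rw [hinv.1]
      simp [PySem.List.length_pyRange_one]
      omega
    · intro idx h₁ h₂
      rw [← List.getD_eq_getElem _ 0 h₁, hinv.2 idx (by rwa [hinv.1] at h₁)]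
      have hlen2 : ((PySem.List.pyRange 0 (1 + ((N - 2 : Nat) : Int)) 1).map (pvCollapse bp (N : Int))).length = N - 1 := by
        simp [PySem.List.length_pyRange_one]
        omega
      by_cases hlast : idx = N - 1
      · subst hlast
        rw [List.getElem_append_right (by rw [hlen2])]
        simp only [hlen2, pvVal, Nat.sub_self, List.getElem_cons_zero]
        rw [← hr]
        simp
      · have hidx : idx < N - 1 := by
          rw [hinv.1] at h₁; omega
        rw [List.getElem_append_left (by rw [hlen2]; omega)]
        rw [List.getElem_map, PySem.List.getElem_pyRange_one]
        have : (0 : Int) + idx = ((idx : Nat) : Int) := by omega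
        rw [this, pv_alt_entry bp N hbp idx (by omega), pvVal]
        rw [if_neg (by omega)]
        by_cases h0 : idx = 0
        · rw [if_pos h0, h0, pvF_zero]
        · rw [if_neg h0, if_pos (by omega)]
  · -- N = 1
    have hm1' : N = 1 := by omega
    rw [htoNat, h1toNat, hm1']
    rw [show ((1 : Nat) : Int) - 1 = 0 by norm_num]
    rw [PySem.List.pyRange_one_eq_nil (by norm_num), PySem.List.pyRange_one_eq_nil (by norm_num)]
    simp
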